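-- pv_equiv track=rewrite | github.com/mabinogi233/xinan | RSA.py | string2ascii
-- ===== SOURCE A (Python) =====
-- def string2ascii(_str):
--     ascii_str=""
--     for charx in _str:
--         ascii_char = int(ord(charx))
--         if(ascii_char<100):
--             ascii_str += "0"
--             ascii_str += str(ascii_char)
--         else:
--             ascii_str += str(ascii_char)
--     return int(ascii_str)
-- ===== SOURCE B (Python) =====
-- def string2ascii(_str):
--     # Accumulate the concatenated ASCII codes directly as an integer:
--     # each code occupies two digits if below 10, otherwise three
--     # (codes below 100 get a leading zero pad).
--     acc = 0
--     for charx in _str: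
--         code = ord(charx)
--         acc = acc * (100 if code < 10 else 1000) + code
--     return acc
-- ===== Notes on version B (the rewrite author's own statement) =====
-- stated objective: alternative
-- what changed: B accumulates the result integer directly by positional arithmetic (acc = acc*10**width + code) instead of concatenating zero-padded digit strings and parsing the result with int(); Pre_ excludes only the empty string, on which A raises ValueError.
import Mathlib
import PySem

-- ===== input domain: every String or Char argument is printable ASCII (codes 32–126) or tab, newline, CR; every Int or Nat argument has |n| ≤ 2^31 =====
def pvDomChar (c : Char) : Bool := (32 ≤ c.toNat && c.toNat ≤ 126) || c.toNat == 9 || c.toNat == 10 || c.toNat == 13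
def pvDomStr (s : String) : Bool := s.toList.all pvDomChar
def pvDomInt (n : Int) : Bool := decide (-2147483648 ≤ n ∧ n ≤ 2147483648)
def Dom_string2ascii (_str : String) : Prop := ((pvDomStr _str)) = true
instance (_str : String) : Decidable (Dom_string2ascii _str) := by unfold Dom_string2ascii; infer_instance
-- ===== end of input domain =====

-- B replaces A's digit-string concatenation + int() parse by direct positional
-- integer accumulation (alternative decomposition, similar cost).


-- ===== PORT A =====
-- Hand port of Python's int() restricted to the strings A ever feeds it
-- (all decimal digits, no sign/space/underscore): value of the digits;
-- none = ValueError on the empty string.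
def pvDV (cs : List Char) : Int := cs.foldl (fun a c => a * 10 + ((c.toNat : Int) - 48)) 0

def pvIntDigits? (cs : List Char) : Option Int :=
  if cs ≠ [] ∧ cs.all Char.isDigit then some (pvDV cs) else none

def string2ascii (_str : String) : Int :=
  let ascii_str := _str.toList.foldl
    (fun ascii_str charx =>
      let ascii_char : Int := charx.toNat
      if ascii_char < 100 then (ascii_str ++ ['0']) ++ PySem.Int.toChars ascii_char
      else ascii_str ++ PySem.Int.toChars ascii_char) []
  (pvIntDigits? ascii_str).getD 0   -- none is unreachable under Pre_ (A raises there)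

-- ===== PORT B =====
def string2ascii_alt (_str : String) : Int :=
  _str.toList.foldl
    (fun acc c =>
      let code : Int := c.toNat
      acc * (if code < 10 then 100 else 1000) + code) 0

-- ===== PRECONDITION & SPEC =====
-- Pre_ excludes exactly the inputs where the Python A raises ValueError: the
-- empty string, on which A calls int('').
def Pre_string2ascii (_str : String) : Prop := _str ≠ ""
instance (_str : String) : Decidable (Pre_string2ascii _str) := by unfold Pre_string2ascii; infer_instance

def pvWitness_string2ascii : String := "ab"

def Spec_string2ascii (_str : String) (out : Int) : Prop := out = string2ascii_alt _str
instance (_str : String) (out : Int) : Decidable (Spec_string2ascii _str out) := by unfold Spec_string2ascii; infer_instance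

-- ===== CLAIM (what is proved, stated in full; the proofs are below) =====
def Claim_equal_string2ascii : Prop := ∀ (_str : String), Dom_string2ascii _str → Pre_string2ascii _str → Spec_string2ascii _str (string2ascii _str)

-- ===== LEMMAS AND PROOFS =====
-- the padded digit block one character contributes to ascii_str
def pvPiece (n : Int) : List Char :=
  if n < 100 then '0' :: PySem.Int.toChars n else PySem.Int.toChars n

theorem pvWitness_ok :
    Dom_string2ascii pvWitness_string2ascii ∧ Pre_string2ascii pvWitness_string2ascii := by
  decide

theorem pvDV_from (cs : List Char) (a : Int) :
    cs.foldl (fun a c => a * 10 + ((c.toNat : Int) - 48)) a = a * 10 ^ cs.length + pvDV cs := by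
  induction cs generalizing a with
  | nil => simp [pvDV]
  | cons c cs ih =>
      simp only [List.foldl_cons, List.length_cons, pvDV] at *
      rw [ih, ih (0 * 10 + ((c.toNat : Int) - 48))]
      ring

theorem pvPiece_facts : ∀ n : Nat, n < 127 →
    ((pvPiece (n : Int)).all Char.isDigit = true ∧
     pvDV (pvPiece (n : Int)) = (n : Int) ∧
     (pvPiece (n : Int)).length = (if ((n : Int)) < 10 then 2 else 3)) := by
  decide

theorem pvCharLt127 (c : Char) (h : pvDomChar c = true) : c.toNat < 127 := by
  simp [pvDomChar] at h
  omega

def pvWidthSum (l : List Char) : Nat := (l.map (fun c => if c.toNat < 10 then 2 else 3)).sum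

theorem pvWidthSum_pos (l : List Char) (h : l ≠ []) : 0 < pvWidthSum l := by
  cases l with
  | nil => exact absurd rfl h
  | cons c l =>
      simp only [pvWidthSum, List.map_cons, List.sum_cons]
      split <;> omega

theorem pv_main (l : List Char) (hd : ∀ c ∈ l, pvDomChar c = true) :
    ∀ acc : List Char, acc.all Char.isDigit = true →
      (l.foldl
        (fun ascii_str charx =>
          let ascii_char : Int := charx.toNat
          if ascii_char < 100 then (ascii_str ++ ['0']) ++ PySem.Int.toChars ascii_char
          else ascii_str ++ PySem.Int.toChars ascii_char) acc).all Char.isDigit = true ∧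
      (l.foldl
        (fun ascii_str charx =>
          let ascii_char : Int := charx.toNat
          if ascii_char < 100 then (ascii_str ++ ['0']) ++ PySem.Int.toChars ascii_char
          else ascii_str ++ PySem.Int.toChars ascii_char) acc).length = acc.length + pvWidthSum l ∧
      pvDV (l.foldl
        (fun ascii_str charx =>
          let ascii_char : Int := charx.toNat
          if ascii_char < 100 then (ascii_str ++ ['0']) ++ PySem.Int.toChars ascii_char
          else ascii_str ++ PySem.Int.toChars ascii_char) acc) =
        l.foldl
          (fun acc c =>
            let code : Int := c.toNat
            acc * (if code < 10 then 100 else 1000) + code) (pvDV acc) := by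
  induction l with
  | nil => intro acc hacc; simp [pvWidthSum, hacc]
  | cons c l ih =>
      intro acc hacc
      have hc : c.toNat < 127 := pvCharLt127 c (hd c (by simp))
      obtain ⟨hdig, hval, hlen⟩ := pvPiece_facts c.toNat hc
      have hstep :
          (let ascii_char : Int := c.toNat
           if ascii_char < 100 then (acc ++ ['0']) ++ PySem.Int.toChars ascii_char
           else acc ++ PySem.Int.toChars ascii_char) = acc ++ pvPiece (c.toNat : Int) := by
        simp only [pvPiece]
        split <;> simp
      have hacc' : (acc ++ pvPiece (c.toNat : Int)).all Char.isDigit = true := by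
        simp [List.all_append, hacc, hdig]
      obtain ⟨ih1, ih2, ih3⟩ := ih (fun x hx => hd x (by simp [hx])) (acc ++ pvPiece (c.toNat : Int)) hacc'
      rw [List.foldl_cons, hstep]
      have hDVapp : pvDV (acc ++ pvPiece (c.toNat : Int)) =
          pvDV acc * (if ((c.toNat : Int)) < 10 then 100 else 1000) + (c.toNat : Int) := by
        have h := pvDV_from (pvPiece (c.toNat : Int)) (pvDV acc)
        simp only [pvDV, List.foldl_append] at *
        rw [h, hlen, hval]
        split <;> norm_num
      refine ⟨ih1, ?_, ?_⟩
      · rw [ih2]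
        simp only [List.length_append, pvWidthSum, List.map_cons, List.sum_cons, hlen]
        have : ((if ((c.toNat : Int)) < 10 then 2 else 3) : Nat) = if c.toNat < 10 then 2 else 3 := by
          split <;> split <;> omega
        omega
      · rw [ih3, hDVapp]
        rfl

-- ===== VERDICT (by name: the statement is the Claim_ definition above) =====
theorem string2ascii_spec : Claim_equal_string2ascii := by
  intro s hdom hpre
  have hl : s.toList ≠ [] := by
    intro h
    exact hpre (String.toList_eq_nil_iff.mp h)
  have hdomL : ∀ c ∈ s.toList, pvDomChar c = true := by
    have := hdom
    simpa [Dom_string2ascii, pvDomStr, List.all_eq_true] using this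
  obtain ⟨h1, h2, h3⟩ := pv_main s.toList hdomL [] (by simp)
  unfold Spec_string2ascii string2ascii string2ascii_alt
  simp only []
  rw [pvIntDigits?]
  have hneL : s.toList.foldl
      (fun ascii_str charx =>
        let ascii_char : Int := charx.toNat
        if ascii_char < 100 then (ascii_str ++ ['0']) ++ PySem.Int.toChars ascii_char
        else ascii_str ++ PySem.Int.toChars ascii_char) [] ≠ [] := by
    intro h
    have := pvWidthSum_pos s.toList hl
    rw [h] at h2
    simp at h2
    omega
  rw [if_pos ⟨hneL, h1⟩]
  simpa [pvDV] using h3
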